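-- pv_equiv track=rewrite | github.com/mohamedfashraf/GuideBot-Campus-AI-Assistant-For-GIU | NLP_Try/finalCombination.py | is_negative
-- ===== SOURCE A (Python) =====
-- def is_negative(response):
--     negative_responses = [
--         "no",
--         "nope",
--         "not now",
--         "maybe later",
--         "negative",
--         "i need something else",
--     ]
--     return any(word in response.lower() for word in negative_responses)
-- ===== SOURCE B (Python) =====
-- def is_negative(response):
--     phrases = ("no", "nope", "not now", "maybe later", "negative",
--                "i need something else")
--     s = response.lower()
--     while s:
--         if any(s.startswith(p) for p in phrases):
--             return True
--         s = s[1:]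
--     return False
-- ===== Notes on version B (the rewrite author's own statement) =====
-- stated objective: alternative
-- what changed: B makes a single left-to-right scan over the lowercased response, testing at each position whether any of the six phrases starts there, instead of A's six independent substring searches.
import Mathlib
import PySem

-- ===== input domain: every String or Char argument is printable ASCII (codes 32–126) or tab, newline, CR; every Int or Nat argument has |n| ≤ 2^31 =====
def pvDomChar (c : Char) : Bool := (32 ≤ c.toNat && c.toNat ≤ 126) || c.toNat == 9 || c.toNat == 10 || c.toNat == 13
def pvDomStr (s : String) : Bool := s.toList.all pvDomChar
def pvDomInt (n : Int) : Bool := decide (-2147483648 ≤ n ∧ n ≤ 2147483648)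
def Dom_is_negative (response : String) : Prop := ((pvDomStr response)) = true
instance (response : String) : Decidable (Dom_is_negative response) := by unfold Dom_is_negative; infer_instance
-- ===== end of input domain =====

-- B replaces A's six independent substring searches by one left-to-right scan that
-- tests each position for any of the six phrases (objective: alternative; same result).

-- ===== PORT A =====
def negPhrasesA : List String :=
  ["no", "nope", "not now", "maybe later", "negative", "i need something else"]

def is_negative (response : String) : Bool :=
  negPhrasesA.any (fun word => PySem.Str.isIn word (PySem.Str.lower response))

-- ===== PORT B =====
def negPhrasesB : List (List Char) :=
  ["no".toList, "nope".toList, "not now".toList, "maybe later".toList,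
   "negative".toList, "i need something else".toList]

-- the 'while s: … s = s[1:]' loop of Source B, on the char list of the lowered string
def negScanB : List Char → Bool
  | [] => false
  | c :: rest =>
      if negPhrasesB.any (fun p => PySem.Chars.startswith (c :: rest) p) then true
      else negScanB rest

def is_negative_alt (response : String) : Bool :=
  negScanB (PySem.Str.lower response).toList

-- ===== PRECONDITION & SPEC =====
def Spec_is_negative (response : String) (out : Bool) : Prop := out = is_negative_alt response
instance (response : String) (out : Bool) : Decidable (Spec_is_negative response out) := by unfold Spec_is_negative; infer_instance

-- ===== CLAIM (what is proved, stated in full; the proofs are below) =====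
def Claim_equal_is_negative : Prop := ∀ (response : String), Dom_is_negative response → Spec_is_negative response (is_negative response)

-- ===== LEMMAS AND PROOFS =====

lemma negScanB_eq_any_isIn (s : List Char) :
    negScanB s = negPhrasesB.any (fun p => PySem.Chars.isIn p s) := by
  induction s with
  | nil => decide
  | cons c rest ih =>
      simp only [negScanB, ih]
      cases h : negPhrasesB.any (fun p => PySem.Chars.startswith (c :: rest) p) with
      | true =>
          simp only [if_true]
          symm
          simp only [List.any_eq_true] at h ⊢
          obtain ⟨p, hp, hsw⟩ := h
          exact ⟨p, hp, (PySem.Chars.isIn_iff_infix _ _).2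
            ((List.infix_cons_iff).2 (Or.inl ((PySem.Chars.startswith_iff _ _).1 hsw)))⟩
      | false =>
          simp only [Bool.false_eq_true, if_false]
          refine Bool.eq_iff_iff.mpr ?_
          simp only [List.any_eq_true]
          constructor
          · rintro ⟨p, hp, hin⟩
            exact ⟨p, hp, (PySem.Chars.isIn_iff_infix _ _).2
              ((List.infix_cons_iff).2 (Or.inr ((PySem.Chars.isIn_iff_infix _ _).1 hin)))⟩
          · rintro ⟨p, hp, hin⟩
            refine ⟨p, hp, (PySem.Chars.isIn_iff_infix _ _).2 ?_⟩
            rcases (List.infix_cons_iff).1 ((PySem.Chars.isIn_iff_infix _ _).1 hin) with hpre | hinf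
            · exact absurd ((PySem.Chars.startswith_iff _ _).2 hpre)
                (by simpa using (List.any_eq_false.1 h) p hp)
            · exact hinf

-- ===== VERDICT (by name: the statement is the Claim_ definition above) =====
theorem is_negative_spec : Claim_equal_is_negative := by
  intro response _
  unfold Spec_is_negative is_negative is_negative_alt
  rw [negScanB_eq_any_isIn]
  simp [negPhrasesA, negPhrasesB, PySem.Str.isIn]
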